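-- pv_equiv track=rewrite | github.com/DeXtroTip/advent-of-code-2020 | raw_solutions/raw_aoc14.py | apply_mask
-- ===== SOURCE A (Python) =====
-- def set_bit(value, bit):
--   return value | (1 << bit)
--
-- def clear_bit(value, bit):
--   return value & ~(1 << bit)
--
-- def apply_mask(mask, val):
--   x = val
--   for i, n in enumerate(mask[::-1]):
--     if n == '1':
--       x = set_bit(x, i)
--     elif n == '0':
--       x = clear_bit(x, i)
--   return x
-- ===== SOURCE B (Python) =====
-- def apply_mask(mask, val):
--     # Build two whole-number masks in one forward pass over the mask string
--     # (no per-bit indexing, no enumerate/reversal), then combine in closed form.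
--     or_mask = 0        # bits forced to 1
--     keep_mask = -1     # bits kept from val (all-ones above the mask)
--     for c in mask:
--         or_mask = (or_mask << 1) | (1 if c == '1' else 0)
--         keep_mask = (keep_mask << 1) | (0 if c == '0' else 1)
--     return (val & keep_mask) | or_mask
-- ===== Notes on version B (the rewrite author's own statement) =====
-- stated objective: simpler
-- what changed: Instead of A's per-bit loop over enumerate(reversed(mask)) mutating val with set_bit/clear_bit helpers, B makes one forward pass accumulating two whole integers (an OR mask and a keep mask, seeded with -1 so bits above the mask are preserved) and returns the closed-form (val & keep_mask) | or_mask.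
import Mathlib
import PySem

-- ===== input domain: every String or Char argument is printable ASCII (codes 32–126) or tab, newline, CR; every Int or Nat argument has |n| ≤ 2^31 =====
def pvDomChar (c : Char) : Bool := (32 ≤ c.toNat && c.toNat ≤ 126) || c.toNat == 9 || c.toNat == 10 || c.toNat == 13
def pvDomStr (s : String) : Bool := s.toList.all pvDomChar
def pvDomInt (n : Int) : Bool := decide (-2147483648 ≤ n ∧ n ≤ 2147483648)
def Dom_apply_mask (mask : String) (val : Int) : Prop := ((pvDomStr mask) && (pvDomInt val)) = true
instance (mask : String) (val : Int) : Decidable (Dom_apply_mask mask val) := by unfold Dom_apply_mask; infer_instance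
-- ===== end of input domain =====

-- B replaces A's per-bit set_bit/clear_bit loop over enumerate(reversed(mask)) by one forward
-- pass building two whole-integer masks and the closed-form combine (val & keep) | or (simpler).

-- ===== PORT A =====
def set_bit (value : Int) (bit : Int) : Int :=
  PySem.Int.bor value ((1 : Int) <<< bit)                 -- value | (1 << bit)

def clear_bit (value : Int) (bit : Int) : Int :=
  PySem.Int.band value (Int.not ((1 : Int) <<< bit))      -- value & ~(1 << bit)

-- loop body of A's 'for i, n in enumerate(mask[::-1])'
def amLoopA (x : Int) (p : Int × Char) : Int :=
  if p.2 = '1' then set_bit x p.1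
  else if p.2 = '0' then clear_bit x p.1
  else x

def apply_mask (mask : String) (val : Int) : Int :=
  -- mask[::-1] is exactly the reversed character list (PySem.Str.slice?_none_none_neg_one)
  (PySem.List.enumerate (mask.toList.reverse) 0).foldl amLoopA val

-- ===== PORT B =====
-- loop body of B's 'for c in mask'
def amMasksB (p : Int × Int) (c : Char) : Int × Int :=
  (PySem.Int.bor (p.1 <<< (1 : Int)) (if c = '1' then 1 else 0),
   PySem.Int.bor (p.2 <<< (1 : Int)) (if c = '0' then 0 else 1))

def apply_mask_alt (mask : String) (val : Int) : Int :=
  let p := mask.toList.foldl amMasksB (0, -1)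
  PySem.Int.bor (PySem.Int.band val p.2) p.1

-- ===== PRECONDITION & SPEC =====
def Spec_apply_mask (mask : String) (val : Int) (out : Int) : Prop := out = apply_mask_alt mask val
instance (mask : String) (val : Int) (out : Int) : Decidable (Spec_apply_mask mask val out) := by unfold Spec_apply_mask; infer_instance

-- ===== CLAIM (what is proved, stated in full; the proofs are below) =====
def Claim_equal_apply_mask : Prop := ∀ (mask : String) (val : Int), Dom_apply_mask mask val → Spec_apply_mask mask val (apply_mask mask val)

-- ===== LEMMAS AND PROOFS =====

-- what one mask character does to one bit of the value
def charBit (c : Char) (b : Bool) : Bool :=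
  if c = '1' then true else if c = '0' then false else b

theorem int_ext {m n : Int} (h : ∀ k, m.testBit k = n.testBit k) : m = n := by
  cases m with
  | ofNat a => cases n with
    | ofNat b =>
      have := Nat.eq_of_testBit_eq (x := a) (y := b) (fun i => by simpa [Int.testBit] using h i)
      simp [this]
    | negSucc b =>
      exfalso
      have h1 : a.testBit (a + b) = false :=
        Nat.testBit_eq_false_of_lt (by calc a < 2^a := Nat.lt_two_pow_self
                                          _ ≤ 2^(a+b) := Nat.pow_le_pow_right (by omega) (by omega))
      have h2 : b.testBit (a + b) = false :=
        Nat.testBit_eq_false_of_lt (by calc b < 2^b := Nat.lt_two_pow_self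
                                          _ ≤ 2^(a+b) := Nat.pow_le_pow_right (by omega) (by omega))
      have := h (a + b)
      simp [Int.testBit, h1, h2] at this
  | negSucc a => cases n with
    | ofNat b =>
      exfalso
      have h1 : a.testBit (a + b) = false :=
        Nat.testBit_eq_false_of_lt (by calc a < 2^a := Nat.lt_two_pow_self
                                          _ ≤ 2^(a+b) := Nat.pow_le_pow_right (by omega) (by omega))
      have h2 : b.testBit (a + b) = false :=
        Nat.testBit_eq_false_of_lt (by calc b < 2^b := Nat.lt_two_pow_self
                                          _ ≤ 2^(a+b) := Nat.pow_le_pow_right (by omega) (by omega))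
      have := h (a + b)
      simp [Int.testBit, h1, h2] at this
    | negSucc b =>
      have := Nat.eq_of_testBit_eq (x := a) (y := b) (fun i => by
        have := h i; simpa [Int.testBit] using this)
      simp [this]

theorem or_add_and (m n : Nat) : (m ||| n) + (m &&& n) = m + n := by
  induction m using Nat.strong_induction_on generalizing n with
  | _ m ih =>
    rcases Nat.eq_zero_or_pos m with hm | hm
    · simp [hm]
    rcases Nat.eq_zero_or_pos n with hn | hn
    · simp [hn]
    have h2 : m / 2 < m := Nat.div_lt_self hm (by omega)
    have := ih (m / 2) h2 (n / 2)
    have hod : (m ||| n) / 2 = m / 2 ||| n / 2 := Nat.or_div_two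
    have had : (m &&& n) / 2 = m / 2 &&& n / 2 := Nat.and_div_two
    have hom : (m ||| n) % 2 = 1 ↔ m % 2 = 1 ∨ n % 2 = 1 := Nat.or_mod_two_eq_one
    have ham : (m &&& n) % 2 = 1 ↔ m % 2 = 1 ∧ n % 2 = 1 := Nat.and_mod_two_eq_one
    omega

theorem nat_sub_and (m n : Nat) : m - (m &&& n) = m.ldiff n := by
  have hor : m.ldiff n ||| (m &&& n) = m := Nat.eq_of_testBit_eq (fun i => by
    simp [Nat.testBit_or, Nat.testBit_and, Nat.testBit_ldiff]
    cases m.testBit i <;> cases n.testBit i <;> rfl)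
  have hand : m.ldiff n &&& (m &&& n) = 0 := Nat.eq_of_testBit_eq (fun i => by
    simp [Nat.testBit_and, Nat.testBit_ldiff]
    cases m.testBit i <;> cases n.testBit i <;> simp)
  have := or_add_and (m.ldiff n) (m &&& n)
  omega

theorem negsucc_cast (x : Nat) : -(x : Int) - 1 = Int.negSucc x := by
  rw [Int.negSucc_eq]; ring

theorem tb_negsucc_le (y : Nat) : ¬ (0:Int) ≤ Int.negSucc y := by
  simp [Int.negSucc_eq]; omega

theorem tb_negsucc_toNat (y : Nat) : (-(Int.negSucc y) - 1).toNat = y := by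
  simp [Int.negSucc_eq]

theorem tb_bor (a b : Int) (k : Nat) :
    (PySem.Int.bor a b).testBit k = (a.testBit k || b.testBit k) := by
  rw [PySem.Int.bor.eq_1]
  cases a with
  | ofNat x =>
    cases b with
    | ofNat y => simp [Int.testBit, Nat.testBit_or]
    | negSucc y =>
      have h1 : (0:Int) ≤ Int.ofNat x := Int.natCast_nonneg _
      simp only [h1, if_true, if_neg (tb_negsucc_le y), tb_negsucc_toNat,
        Int.toNat_natCast, negsucc_cast, nat_sub_and]
      simp [Int.testBit, Nat.testBit_ldiff]
      cases x.testBit k <;> cases y.testBit k <;> rfl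
  | negSucc x =>
    cases b with
    | ofNat y =>
      have h1 : (0:Int) ≤ Int.ofNat y := Int.natCast_nonneg _
      simp only [h1, if_true, if_neg (tb_negsucc_le x), tb_negsucc_toNat,
        Int.toNat_natCast, negsucc_cast, nat_sub_and]
      simp [Int.testBit, Nat.testBit_ldiff]
    | negSucc y =>
      simp only [if_neg (tb_negsucc_le x), if_neg (tb_negsucc_le y), tb_negsucc_toNat,
        negsucc_cast]
      simp [Int.testBit, Nat.testBit_and]

theorem tb_band (a b : Int) (k : Nat) :
    (PySem.Int.band a b).testBit k = (a.testBit k && b.testBit k) := by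
  rw [PySem.Int.band.eq_1]
  cases a with
  | ofNat x =>
    cases b with
    | ofNat y => simp [Int.testBit, Nat.testBit_and]
    | negSucc y =>
      have h1 : (0:Int) ≤ Int.ofNat x := Int.natCast_nonneg _
      simp only [h1, if_true, if_neg (tb_negsucc_le y), tb_negsucc_toNat,
        Int.toNat_natCast, nat_sub_and]
      simp [Int.testBit, Nat.testBit_ldiff]
  | negSucc x =>
    cases b with
    | ofNat y =>
      have h1 : (0:Int) ≤ Int.ofNat y := Int.natCast_nonneg _
      simp only [h1, if_true, if_neg (tb_negsucc_le x), tb_negsucc_toNat,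
        Int.toNat_natCast, nat_sub_and]
      simp [Int.testBit, Nat.testBit_ldiff]
      cases x.testBit k <;> cases y.testBit k <;> rfl
    | negSucc y =>
      simp only [if_neg (tb_negsucc_le x), if_neg (tb_negsucc_le y), tb_negsucc_toNat,
        negsucc_cast]
      simp [Int.testBit, Nat.testBit_or]

theorem tb_not (a : Int) (k : Nat) : (Int.not a).testBit k = !a.testBit k := by
  cases a <;> simp [Int.not, Int.testBit]

theorem tb_zero (k : Nat) : (0 : Int).testBit k = false := by
  simp [Int.testBit]

theorem tb_one (k : Nat) : (1 : Int).testBit k = decide (k = 0) := by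
  show (Nat.testBit 1 k) = decide (k = 0)
  have h := Nat.testBit_two_pow (n := 0) (m := k)
  simp only [pow_zero] at h
  rw [h]
  rcases eq_or_ne k 0 with h0 | h0
  · simp [h0]
  · simp [h0, Ne.symm h0]

theorem tb_neg_one (k : Nat) : (-1 : Int).testBit k = true := by
  have : (-1 : Int) = Int.negSucc 0 := rfl
  rw [this]; simp [Int.testBit]

theorem tb_one_shift (s k : Nat) : ((1 : Int) <<< ((s : Nat) : Int)).testBit k = decide (s = k) := by
  rw [Int.one_shiftLeft]
  simpa [Int.testBit] using Nat.testBit_two_pow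

theorem tb_shift_one (a : Int) (k : Nat) :
    (a <<< (1 : Int)).testBit k = if k = 0 then false else a.testBit (k - 1) := by
  have h1 : (1 : Int) = ((1 : Nat) : Int) := rfl
  cases a with
  | ofNat m =>
    rw [h1, Int.ofNat_eq_natCast, Int.shiftLeft_natCast]
    rcases k with _ | k <;> simp [Int.testBit, Nat.testBit_shiftLeft]
  | negSucc m =>
    rw [h1, Int.shiftLeft_negSucc]
    have h2 : Nat.shiftLeft' true m 1 = 2 * m + 1 := by
      simp [Nat.shiftLeft', Nat.bit]
    rcases k with _ | k
    · simp [Int.testBit, h2, Nat.testBit_zero]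
    · have h3 : (2 * m + 1).testBit (k+1) = m.testBit k := by
        have : 2 * m + 1 = Nat.bit true m := by simp [Nat.bit]
        rw [this, Nat.testBit_bit_succ]
      simp [Int.testBit, h2, h3]

theorem tbA (l : List Char) (s : Nat) (x : Int) (k : Nat) :
    ((PySem.List.enumerate l (s : Int)).foldl amLoopA x).testBit k =
      if h : s ≤ k ∧ k - s < l.length then charBit (l[k - s]'h.2) (x.testBit k)
      else x.testBit k := by
  induction l generalizing s x with
  | nil => simp [PySem.List.enumerate_nil]
  | cons c t ih =>
    rw [PySem.List.enumerate_cons, List.foldl_cons]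
    have hc : ((s : Int) + 1) = ((s + 1 : Nat) : Int) := by push_cast; ring
    rw [hc, ih]
    have hstep : (amLoopA x ((s : Int), c)).testBit k =
        if k = s then charBit c (x.testBit k) else x.testBit k := by
      simp only [amLoopA, set_bit, clear_bit, charBit]
      by_cases h1 : c = '1'
      · simp only [h1, if_true, tb_bor, tb_one_shift]
        rcases eq_or_ne k s with h | h
        · simp [h]
        · simp [h, Ne.symm h]
      · by_cases h2 : c = '0'
        · simp only [h1, h2, if_false, if_true]
          rcases eq_or_ne k s with h | h
          · simp [tb_band, tb_not, tb_one_shift, h]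
          · simp [tb_band, tb_not, tb_one_shift, h, Ne.symm h]
        · simp only [h1, h2, if_false]
          split_ifs <;> rfl
    by_cases hks : k = s
    · subst hks
      rw [dif_neg (by omega), hstep, if_pos rfl, dif_pos ⟨by omega, by simp⟩]
      simp
    · by_cases hin : s + 1 ≤ k ∧ k - (s + 1) < t.length
      · rw [dif_pos hin, dif_pos (⟨by omega, by simp; omega⟩ : s ≤ k ∧ k - s < (c :: t).length)]
        have hidx : (c :: t)[k - s]'(by simp; omega) = t[k - (s+1)]'(hin.2) := by
          have : k - s = (k - (s+1)) + 1 := by omega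
          simp [this]
        rw [hidx, hstep, if_neg hks]
      · rw [dif_neg hin, hstep, if_neg hks, dif_neg (by simp; omega)]

theorem tbB1 (m : List Char) (o kp : Int) (k : Nat) :
    ((m.foldl amMasksB (o, kp)).1).testBit k =
      if h : k < m.length then decide (m[m.length - 1 - k]'(by omega) = '1')
      else o.testBit (k - m.length) := by
  induction m generalizing o kp with
  | nil => simp
  | cons c t ih =>
    rw [List.foldl_cons]
    have hstep : amMasksB (o, kp) c =
        (PySem.Int.bor (o <<< (1 : Int)) (if c = '1' then 1 else 0),
         PySem.Int.bor (kp <<< (1 : Int)) (if c = '0' then 0 else 1)) := rfl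
    rw [hstep, ih]
    have ho : ∀ j : Nat, (PySem.Int.bor (o <<< (1 : Int)) (if c = '1' then 1 else 0)).testBit j =
        if j = 0 then decide (c = '1') else o.testBit (j - 1) := by
      intro j
      rw [tb_bor, tb_shift_one]
      rcases eq_or_ne j 0 with hj | hj <;>
        by_cases h1 : c = '1' <;> simp [hj, h1, tb_one, tb_zero]
    by_cases hk : k < t.length
    · rw [dif_pos hk, dif_pos (show k < (c :: t).length by simp only [List.length_cons]; omega)]
      have h1 : (c :: t).length - 1 - k = (t.length - 1 - k) + 1 := by
        simp only [List.length_cons]; omega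
      simp only [h1, List.getElem_cons_succ]
    · by_cases hk2 : k = t.length
      · rw [dif_neg hk, dif_pos (show k < (c :: t).length by simp only [List.length_cons]; omega),
          ho, if_pos (by omega)]
        have h1 : (c :: t).length - 1 - k = 0 := by simp only [List.length_cons]; omega
        simp only [h1, List.getElem_cons_zero]
      · rw [dif_neg hk, dif_neg (show ¬ k < (c :: t).length by simp only [List.length_cons]; omega),
          ho, if_neg (by omega)]
        have h1 : k - t.length - 1 = k - (c :: t).length := by
          simp only [List.length_cons]; omega
        rw [h1]

theorem tbB2 (m : List Char) (o kp : Int) (k : Nat) :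
    ((m.foldl amMasksB (o, kp)).2).testBit k =
      if h : k < m.length then !decide (m[m.length - 1 - k]'(by omega) = '0')
      else kp.testBit (k - m.length) := by
  induction m generalizing o kp with
  | nil => simp
  | cons c t ih =>
    rw [List.foldl_cons]
    have hstep : amMasksB (o, kp) c =
        (PySem.Int.bor (o <<< (1 : Int)) (if c = '1' then 1 else 0),
         PySem.Int.bor (kp <<< (1 : Int)) (if c = '0' then 0 else 1)) := rfl
    rw [hstep, ih]
    have ho : ∀ j : Nat, (PySem.Int.bor (kp <<< (1 : Int)) (if c = '0' then 0 else 1)).testBit j =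
        if j = 0 then !decide (c = '0') else kp.testBit (j - 1) := by
      intro j
      rw [tb_bor, tb_shift_one]
      rcases eq_or_ne j 0 with hj | hj <;>
        by_cases h1 : c = '0' <;> simp [hj, h1, tb_one, tb_zero]
    by_cases hk : k < t.length
    · rw [dif_pos hk, dif_pos (show k < (c :: t).length by simp only [List.length_cons]; omega)]
      have h1 : (c :: t).length - 1 - k = (t.length - 1 - k) + 1 := by
        simp only [List.length_cons]; omega
      simp only [h1, List.getElem_cons_succ]
    · by_cases hk2 : k = t.length
      · rw [dif_neg hk, dif_pos (show k < (c :: t).length by simp only [List.length_cons]; omega),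
          ho, if_pos (by omega)]
        have h1 : (c :: t).length - 1 - k = 0 := by simp only [List.length_cons]; omega
        simp only [h1, List.getElem_cons_zero]
      · rw [dif_neg hk, dif_neg (show ¬ k < (c :: t).length by simp only [List.length_cons]; omega),
          ho, if_neg (by omega)]
        have h1 : k - t.length - 1 = k - (c :: t).length := by
          simp only [List.length_cons]; omega
        rw [h1]

theorem apply_mask_eq_alt (mask : String) (val : Int) :
    apply_mask mask val = apply_mask_alt mask val := by
  unfold apply_mask apply_mask_alt
  apply int_ext
  intro k
  have h0 : (0 : Int) = ((0 : Nat) : Int) := rfl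
  rw [h0, tbA]
  rw [tb_bor, tb_band, tbB1, tbB2]
  set m := mask.toList with hm
  by_cases hk : k < m.length
  · rw [dif_pos (by simp; omega), dif_pos hk, dif_pos hk]
    have hrev : m.reverse[k - 0]'(by simp; omega) = m[m.length - 1 - k]'(by omega) := by
      simp [List.getElem_reverse]
    rw [hrev]
    unfold charBit
    by_cases h1 : m[m.length - 1 - k]'(by omega) = '1'
    · simp [h1]
    · by_cases h2 : m[m.length - 1 - k]'(by omega) = '0'
      · simp [h1, h2]
      · simp [h1, h2]
  · rw [dif_neg (by simp; omega), dif_neg hk, dif_neg hk, tb_neg_one]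
    have : ((0:Nat) : Int).testBit (k - m.length) = false := tb_zero _
    rw [this]
    simp

-- ===== VERDICT (by name: the statement is the Claim_ definition above) =====
theorem apply_mask_spec : Claim_equal_apply_mask := by
  intro mask val _
  unfold Spec_apply_mask
  exact apply_mask_eq_alt mask val
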